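-- pv_equiv track=rewrite | github.com/gituser103/macropy | macro.py | trieSearch
-- ===== SOURCE A (Python) =====
-- def trieSearch(searchlist):
--     # finds longest match
--     # searcharray[0] is the search field you are trying to match
--     # searcharray[1:] is a list of candidate matches
--     # will return:-
--     #  an exact match for searcharray[0]
--     #  or the longest element in searcharray[1:]
--     #  that starts the search field
--
--     if len(searchlist) < 2:
--         return []
-- # too few arguments
--
--     list1 = searchlist
--     list1_0_len = len(list1[0])
--     lenlist1 = [list1_0_len]  # element zero is a constant
--     for listindex in range(1, len(list1)):
--         lenlist1.append(len(list1[listindex])) # build list of lengths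
--     # list of lenths of corresponding elements in list1
--     found = []  # accumulate matches by string length
--     characterIndex = 0
--
--     # searchlist[0] is the item you are seeking to match
--     # searchlist[1:] is the list of possible matches
--
--     while (len(list1) > 1) and (characterIndex < list1_0_len):
--         list2 = [list1[0]]
--         lenlist2 = [list1_0_len]
--         while list1_0_len > characterIndex:
--             # characterIndex iterates over chars to be matched
--
--             # list2 is the output from the search pass
--             # at the end of each pass list2 is copied to list1
--
--             for listindex in range(1, len(list1)):
--                 # listindex iterates over fields to be matched
--                 if (lenlist1[listindex] > characterIndex) and (list1_0_len > characterIndex):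
--                     # if lengths are in range
--                     if list1[0][characterIndex] == list1[listindex][
--                             characterIndex]:
--                         # and corresponding chars match for this pass
--                         list2.append(list1[listindex])
--                         lenlist2.append(lenlist1[listindex])
-- # list2 has matches for this pass
-- #                list2 is a list of matches for the latest pass
--
--             list1 = list2
--             lenlist1 = lenlist2
--             list2 = [list1[0]]
--             lenlist2 = [list1_0_len]
--             characterIndex = characterIndex + 1
--             # iterate over list1[1] - list1[end]
--             # if list1[entry] has all its characters matched
--             # add list1[entry] to the list of matches found
--             # the longest match is the latest one to be added to the list
--             for sindex in range(1, len(list1)):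
--                 if lenlist1[sindex] == characterIndex:
--                     found.append(list1[sindex])
--
--
-- # entry has been fully matched
--
-- # characterIndex now equal to list1_0_len which is a match
-- # or characterIndex is less than list1_0_len which is no match and
-- # return the longest match or null
--
--     return found
-- ===== SOURCE B (Python) =====
-- def trieSearch(searchlist):
--     if len(searchlist) < 2:
--         return []
--     target = searchlist[0]
--     matches = [c for c in searchlist[1:] if c and target.startswith(c)]
--     return sorted(matches, key=len)
-- ===== Notes on version B (the rewrite author's own statement) =====
-- stated objective: simpler
-- what changed: A's pass-by-pass character rescans of a shrinking candidate list (collecting fully-matched candidates length by length) are replaced by a single filter keeping the non-empty candidates that are prefixes of the target, followed by a stable sort by length.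
import Mathlib
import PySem

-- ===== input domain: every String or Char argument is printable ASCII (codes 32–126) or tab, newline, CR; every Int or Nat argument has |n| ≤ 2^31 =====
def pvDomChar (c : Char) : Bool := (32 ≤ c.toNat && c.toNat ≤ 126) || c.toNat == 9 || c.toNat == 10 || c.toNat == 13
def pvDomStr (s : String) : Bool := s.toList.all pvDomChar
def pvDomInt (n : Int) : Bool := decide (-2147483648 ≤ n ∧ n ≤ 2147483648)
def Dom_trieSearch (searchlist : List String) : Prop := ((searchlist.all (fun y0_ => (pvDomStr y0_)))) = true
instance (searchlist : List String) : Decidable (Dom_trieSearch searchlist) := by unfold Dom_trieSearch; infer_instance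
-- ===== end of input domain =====

-- B replaces A's pass-by-pass character rescans of a shrinking candidate list with one
-- prefix filter plus a stable sort by length (objective: simpler; same return value).

-- ===== PORT A =====
-- A keeps the target at list1[0] and a parallel list of lengths; the port carries the
-- target separately and pairs each candidate with its length (the same values A maintains).

-- the inner 'for listindex in range(1, len(list1))' building list2/lenlist2 by appends
def trieSearchPass (t : String) (ci : Int) (rest : List (String × Int)) : List (String × Int) :=
  rest.foldl (fun acc p =>
    if p.2 > ci && PySem.Str.len t > ci &&
        (PySem.Str.pyGet? t ci == PySem.Str.pyGet? p.1 ci) then acc ++ [p] else acc) []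

def trieSearchFound (found : List String) (ci : Int) (rest : List (String × Int)) : List String :=
  rest.foldl (fun acc p => if p.2 == ci then acc ++ [p.1] else acc) found

def trieSearchLoop (t : String) (rest : List (String × Int)) (found : List String) (ci : Int) :
    List String :=
  if h : PySem.Str.len t > ci then
    let rest2 := trieSearchPass t ci rest
    let found2 := trieSearchFound found (ci + 1) rest2
    trieSearchLoop t rest2 found2 (ci + 1)
  else found
termination_by (PySem.Str.len t - ci).toNat
decreasing_by simp only [PySem.Str.len_eq] at *; omega
def trieSearch (searchlist : List String) : List String :=
  if searchlist.length < 2 then []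
  else
    match searchlist with
    | [] => []
    | t :: cs =>
      let rest := cs.map (fun c => (c, PySem.Str.len c))
      if rest.length + 1 > 1 && PySem.Str.len t > 0 then trieSearchLoop t rest [] 0 else []

-- ===== PORT B =====
def trieSearch_alt (searchlist : List String) : List String :=
  if searchlist.length < 2 then []
  else
    match searchlist with
    | [] => []
    | target :: rest =>
      let ms := rest.filter (fun c => !(c == "") && PySem.Str.startswith target c)
      PySem.List.sorted ms PySem.Str.len false

-- ===== PRECONDITION & SPEC =====
def Spec_trieSearch (searchlist : List String) (out : List String) : Prop := out = trieSearch_alt searchlist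
instance (searchlist : List String) (out : List String) : Decidable (Spec_trieSearch searchlist out) := by unfold Spec_trieSearch; infer_instance

-- ===== CLAIM (what is proved, stated in full; the proofs are below) =====
def Claim_equal_trieSearch : Prop := ∀ (searchlist : List String), Dom_trieSearch searchlist → Spec_trieSearch searchlist (trieSearch searchlist)

-- ===== LEMMAS AND PROOFS =====

def pvMatchFrom (T S : List Char) (c : Nat) : Bool :=
  (List.range' c (S.length - c)).all (fun k => T[k]? == S[k]?)

lemma mf_step (T S : List Char) (c : Nat) (h : c < S.length) :
    pvMatchFrom T S c = ((T[c]? == S[c]?) && pvMatchFrom T S (c+1)) := by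
  unfold pvMatchFrom
  have h1 : S.length - c = (S.length - (c+1)) + 1 := by omega
  rw [h1, List.range'_succ]
  simp

lemma mf_trivial (T S : List Char) (c : Nat) (h : S.length ≤ c) :
    pvMatchFrom T S c = true := by
  unfold pvMatchFrom
  simp [Nat.sub_eq_zero_of_le h]

lemma mf_zero_iff (T S : List Char) :
    pvMatchFrom T S 0 = true ↔ S <+: T := by
  unfold pvMatchFrom
  simp only [Nat.sub_zero, List.all_eq_true, List.mem_range'_1, Nat.zero_le, true_and, zero_add, beq_iff_eq]
  constructor
  · intro h
    have hl : S.length ≤ T.length := by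
      by_contra hc
      have := h T.length (by omega)
      rw [List.getElem?_eq_none_iff.mpr (by omega)] at this
      rw [List.getElem?_eq_getElem (by omega)] at this
      simp at this
    refine List.prefix_iff_getElem.mpr ⟨hl, fun i hi => ?_⟩
    have := h i hi
    rw [List.getElem?_eq_getElem (by omega), List.getElem?_eq_getElem hi] at this
    exact (Option.some_inj.mp this).symm
  · intro h k hk
    have hl := h.length_le
    rw [List.getElem?_eq_getElem (by omega), List.getElem?_eq_getElem hk]
    exact congrArg some (h.getElem hk).symm
lemma insertBy_all_before {α : Type} (before : α → α → Bool) (x : α) (zs : List α)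
    (h : ∀ z ∈ zs, before x z = true) :
    PySem.List.insertBy before x zs = x :: zs := by
  cases zs with
  | nil => rfl
  | cons z zs => simp [PySem.List.insertBy, h z (by simp)]

lemma insertBy_append_not {α : Type} (before : α → α → Bool) (x : α) (ys zs : List α)
    (h : ∀ y ∈ ys, before x y = false) :
    PySem.List.insertBy before x (ys ++ zs) = ys ++ PySem.List.insertBy before x zs := by
  induction ys with
  | nil => rfl
  | cons y ys ih =>
    simp only [List.cons_append, PySem.List.insertBy, h y (by simp)]
    simp only [Bool.false_eq_true, if_false, List.cons.injEq, true_and]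
    exact ih (fun y hy => h y (by simp [hy]))

lemma ins_buckets (x : String) (l : List String) :
    ∀ (k a : Nat), a ≤ x.length → x.length < a + k →
    PySem.List.insertBy (fun p q => decide (PySem.Str.len p < PySem.Str.len q)) x
      ((List.range' a k).flatMap (fun j => l.filter (fun s => s.length == j)))
    = (List.range' a k).flatMap (fun j => (l ++ [x]).filter (fun s => s.length == j)) := by
  intro k
  induction k with
  | zero => intro a h1 h2; omega
  | succ k ih =>
    intro a h1 h2
    rw [List.range'_succ, List.flatMap_cons, List.flatMap_cons]
    by_cases ha : x.length = a
    · -- x belongs in the head bucket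
      rw [insertBy_append_not _ _ _ _ (by
        intro y hy
        simp only [List.mem_filter, beq_iff_eq] at hy
        simp [PySem.Str.len_eq, decide_eq_false_iff_not]
        omega)]
      rw [insertBy_all_before _ _ _ (by
        intro z hz
        simp only [List.mem_flatMap, List.mem_filter, beq_iff_eq, List.mem_range'_1] at hz
        obtain ⟨j, ⟨hj1, hj2⟩, _, hlen⟩ := hz
        simp [PySem.Str.len_eq]
        omega)]
      have hhead : (l ++ [x]).filter (fun s => s.length == a) =
          l.filter (fun s => s.length == a) ++ [x] := by
        rw [List.filter_append]; simp [ha]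
      rw [hhead]
      have htail : ((List.range' (a+1) k).flatMap (fun j => (l ++ [x]).filter (fun s => s.length == j)))
          = (List.range' (a+1) k).flatMap (fun j => l.filter (fun s => s.length == j)) := by
        refine List.flatMap_congr (fun j hj => ?_)
        simp only [List.mem_range'_1] at hj
        rw [List.filter_append]
        simp only [List.filter_cons, List.filter_nil]
        have : (x.length == j) = false := by simp; omega
        simp [this]
      rw [htail]
      simp
    · -- x belongs further right
      rw [insertBy_append_not _ _ _ _ (by
        intro y hy
        simp only [List.mem_filter, beq_iff_eq] at hy
        simp [PySem.Str.len_eq, decide_eq_false_iff_not]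
        omega)]
      rw [ih (a+1) (by omega) (by omega)]
      have hhead : (l ++ [x]).filter (fun s => s.length == a) =
          l.filter (fun s => s.length == a) := by
        rw [List.filter_append]
        simp only [List.filter_cons, List.filter_nil]
        have : (x.length == a) = false := by simp [ha]
        simp [this]
      rw [hhead]

lemma sorted_len_buckets (n : Nat) :
    ∀ (l : List String), (∀ s ∈ l, 1 ≤ s.length ∧ s.length ≤ n) →
    PySem.List.sorted l PySem.Str.len false
    = (List.range' 1 n).flatMap (fun j => l.filter (fun s => s.length == j)) := by
  intro l
  induction l using List.reverseRecOn with
  | nil => simp [PySem.List.sorted_eq_foldl_insertBy]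
  | append_singleton l x ih =>
    intro h
    rw [PySem.List.sorted_eq_foldl_insertBy, List.foldl_append, ← PySem.List.sorted_eq_foldl_insertBy]
    simp only [List.foldl_cons, List.foldl_nil]
    rw [ih (fun s hs => h s (by simp [hs]))]
    have hx := h x (by simp)
    exact ins_buckets x l n 1 hx.1 (by omega)
def pvBuckets (t : String) (rest : List (String × Int)) (c : Nat) : List String :=
  (List.range' (c + 1) (t.length - c)).flatMap
    (fun j => (rest.filter (fun p => p.1.length == j && pvMatchFrom t.toList p.1.toList c)).map (·.1))
lemma pass_eq (t : String) (ci : Int) (rest : List (String × Int)) :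
    trieSearchPass t ci rest = rest.filter (fun p =>
      p.2 > ci && PySem.Str.len t > ci && (PySem.Str.pyGet? t ci == PySem.Str.pyGet? p.1 ci)) := by
  unfold trieSearchPass
  rw [PySem.List.foldl_append_if_eq_filter]
  simp

lemma found_eq (found : List String) (ci : Int) (rest : List (String × Int)) :
    trieSearchFound found ci rest = found ++ (rest.filter (fun p => p.2 == ci)).map (·.1) := by
  unfold trieSearchFound
  exact PySem.List.foldl_append_if _ _ _ _

lemma buckets_step (t : String) (rest : List (String × Int)) (c : Nat)
    (hc : c < t.length) (hp : ∀ p ∈ rest, p.2 = (p.1.length : Int)) :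
    pvBuckets t rest c
    = ((trieSearchPass t (c : Int) rest).filter (fun p => p.2 == ((c + 1 : Nat) : Int))).map (·.1)
      ++ pvBuckets t (trieSearchPass t (c : Int) rest) (c + 1) := by
  unfold pvBuckets
  have h1 : t.length - c = (t.length - (c + 1)) + 1 := by omega
  rw [h1, List.range'_succ, List.flatMap_cons]
  rw [pass_eq]
  congr 1
  · -- head bucket
    rw [List.filter_filter]
    refine congrArg _ (List.filter_congr (fun p hmem => ?_))
    have h2 := hp p hmem
    by_cases hl : p.1.length = c + 1
    · have hlt : c < p.1.toList.length := by simp [hl]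
      rw [mf_step _ _ _ hlt]
      rw [mf_trivial _ _ (c+1) (by simp [hl])]
      simp only [PySem.Str.len_eq, h2, hl]
      simp [show (c:Int) < (c:Int)+1 by omega, show (c:Int) < (t.length:Int) by exact_mod_cast hc]
    · have : (p.1.length == c + 1) = false := by simp [hl]
      simp [this, h2]
      omega
  · -- remaining buckets
    refine List.flatMap_congr (fun j hj => ?_)
    simp only [List.mem_range'_1] at hj
    rw [List.filter_filter]
    refine congrArg _ (List.filter_congr (fun p hmem => ?_))
    have h2 := hp p hmem
    by_cases hl : p.1.length = j
    · have hlt : c < p.1.toList.length := by simp [hl]; omega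
      rw [mf_step _ _ _ hlt]
      simp only [PySem.Str.len_eq, h2, hl]
      simp [show (c:Int) < (j:Int) by exact_mod_cast (by omega : c < j),
            show (c:Int) < (t.length:Int) by exact_mod_cast hc]
      cases (t.toList[c]? == p.1.toList[c]?) <;>
        cases pvMatchFrom t.toList p.1.toList (c+1) <;> simp
    · have hbe : (p.1.length == j) = false := by simp [hl]
      simp [hbe]

lemma loop_eq (t : String) : ∀ (k c : Nat) (rest : List (String × Int)) (found : List String),
    t.length - c = k → (∀ p ∈ rest, p.2 = (p.1.length : Int)) →
    trieSearchLoop t rest found (c : Int) = found ++ pvBuckets t rest c := by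
  intro k
  induction k with
  | zero =>
    intro c rest found hk hp
    rw [trieSearchLoop]
    rw [dif_neg (by simp [PySem.Str.len_eq]; omega)]
    unfold pvBuckets
    rw [hk]
    simp
  | succ k ih =>
    intro c rest found hk hp
    have hc : c < t.length := by omega
    have hgt : PySem.Str.len t > (c : Int) := by
      simp [PySem.Str.len_eq]; omega
    rw [trieSearchLoop, dif_pos hgt]
    show trieSearchLoop t (trieSearchPass t ↑c rest)
        (trieSearchFound found (↑c + 1) (trieSearchPass t ↑c rest)) (↑c + 1)
      = found ++ pvBuckets t rest c
    have hp2 : ∀ p ∈ trieSearchPass t ↑c rest, p.2 = (p.1.length : Int) := by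
      rw [pass_eq]
      intro p hp'
      exact hp p (List.mem_filter.mp hp').1
    rw [show ((c : Int) + 1) = ((c + 1 : Nat) : Int) by push_cast; ring]
    rw [ih (c + 1) _ _ (by omega) hp2]
    rw [found_eq]
    rw [buckets_step t rest c hc hp]
    simp
lemma mf_zero_eq_startswith (t s : String) :
    pvMatchFrom t.toList s.toList 0 = PySem.Chars.startswith t.toList s.toList := by
  cases hx : PySem.Chars.startswith t.toList s.toList
  · rw [Bool.eq_false_iff]
    intro hmf
    rw [(PySem.Chars.startswith_iff _ _).mpr ((mf_zero_iff _ _).mp hmf)] at hx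
    cases hx
  · exact (mf_zero_iff _ _).mpr ((PySem.Chars.startswith_iff _ _).mp hx)

lemma trieSearch_eq (searchlist : List String) :
    trieSearch searchlist = trieSearch_alt searchlist := by
  unfold trieSearch trieSearch_alt
  by_cases hlen : searchlist.length < 2
  · simp [hlen]
  · rw [if_neg hlen, if_neg hlen]
    match searchlist, hlen with
    | t :: cs, hlen =>
    have hcs : cs ≠ [] := by
      intro h; subst h; simp at hlen
    simp only []
    by_cases ht : t.length = 0
    · -- empty target: A's guard fails, B's filter is empty
      have htl : t.toList = [] := by
        rw [← String.length_toList] at ht; exact List.length_eq_zero_iff.mp ht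
      rw [if_neg (by simp [PySem.Str.len_eq, htl])]
      have hfil : cs.filter (fun c => !(c == "") && PySem.Str.startswith t c) = [] := by
        apply List.filter_eq_nil_iff.mpr
        intro s hs
        by_cases hse : s = ""
        · simp [hse]
        · have : ¬ (s.toList <+: t.toList) := by
            rw [htl]
            simp only [List.prefix_nil]
            intro hh
            exact hse (String.toList_inj.mp (by rw [hh]; simp))
          simp [PySem.Str.startswith_eq, hse]
          rw [Bool.eq_false_iff]
          intro hsw
          exact this ((PySem.Chars.startswith_iff _ _).mp hsw)
      rw [hfil]
      simp [PySem.List.sorted_eq_foldl_insertBy]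
    · -- non-empty target
      rw [if_pos (by simp only [Bool.and_eq_true, decide_eq_true_eq, PySem.Str.len_eq, List.length_map, String.length_toList]; exact ⟨by have := List.length_pos_iff.mpr hcs; omega, by omega⟩)]
      have hp0 : ∀ p ∈ cs.map (fun c => (c, PySem.Str.len c)), p.2 = (p.1.length : Int) := by
        intro p hp
        obtain ⟨c, _, rfl⟩ := List.mem_map.mp hp
        simp [PySem.Str.len_eq]
      rw [show (0 : Int) = ((0 : Nat) : Int) by norm_num]
      rw [loop_eq t t.length 0 _ [] (by omega) hp0]
      rw [List.nil_append]
      -- buckets over the paired list = buckets over cs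
      unfold pvBuckets
      have hbucket : ∀ j, ((cs.map (fun c => (c, PySem.Str.len c))).filter
            (fun p => p.1.length == j && pvMatchFrom t.toList p.1.toList 0)).map (·.1)
          = cs.filter (fun s => s.length == j && pvMatchFrom t.toList s.toList 0) := by
        intro j
        rw [List.filter_map, List.map_map]
        simp [Function.comp_def]
      -- B's sorted result, bucketed
      have hms : ∀ s ∈ cs.filter (fun c => !(c == "") && PySem.Str.startswith t c),
          1 ≤ s.length ∧ s.length ≤ t.length := by
        intro s hs
        have := List.mem_filter.mp hs
        obtain ⟨-, h2⟩ := this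
        simp only [Bool.and_eq_true, Bool.not_eq_true'] at h2
        obtain ⟨hne, hsw⟩ := h2
        have hpre := (PySem.Chars.startswith_iff _ _).mp (by rwa [PySem.Str.startswith_eq] at hsw)
        have hlenle := hpre.length_le
        simp only [String.length_toList] at hlenle
        refine ⟨?_, hlenle⟩
        by_contra hc
        have : s.length = 0 := by omega
        have : s = "" := by
          rw [← String.length_toList] at this
          rw [← String.toList_inj, String.toList_empty]
          exact List.length_eq_zero_iff.mp this
        simp [this] at hne
      rw [sorted_len_buckets t.length _ hms]
      rw [Nat.sub_zero, Nat.zero_add]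
      refine List.flatMap_congr (fun j hj => ?_)
      simp only [List.mem_range'_1] at hj
      rw [hbucket j, List.filter_filter]
      refine List.filter_congr (fun s hs => ?_)
      rw [mf_zero_eq_startswith, ← PySem.Str.startswith_eq]
      by_cases hl : s.length = j
      · have hne : (s == "") = false := by
          rw [beq_eq_false_iff_ne]
          intro h
          subst h
          simp at hl
          omega
        simp [hl, hne]
      · have : (s.length == j) = false := by simp [hl]
        simp [this]

-- ===== VERDICT (by name: the statement is the Claim_ definition above) =====
theorem trieSearch_spec : Claim_equal_trieSearch := by
  intro searchlist _
  exact trieSearch_eq searchlist
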